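-- pv_equiv track=rewrite | github.com/Flamesword33/python-projects | 2023/critical_rolls_proof.py | roll_ac_with_crit
-- ===== SOURCE A (Python) =====
-- def roll_ac_with_crit(ac):
--     damage = 0
--     for roll in range(2,21):
--         if roll == 20:
--             damage = damage + 28
--         elif roll >= ac and roll != 20:
--             damage = damage + 14
--     return damage
-- ===== SOURCE B (Python) =====
-- def roll_ac_with_crit(ac):
--     # closed form: crit (natural 20) always adds 28; each roll in 2..19 with roll >= ac adds 14
--     count = 20 - ac
--     if count < 0:
--         count = 0
--     elif count > 18:
--         count = 18
--     return 28 + 14 * count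
-- ===== Notes on version B (the rewrite author's own statement) =====
-- stated objective: simpler
-- what changed: Replaced the fixed per-roll loop with a closed-form expression: the crit bonus plus the hit damage times the clamped count of non-crit rolls meeting the AC.
import Mathlib
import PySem

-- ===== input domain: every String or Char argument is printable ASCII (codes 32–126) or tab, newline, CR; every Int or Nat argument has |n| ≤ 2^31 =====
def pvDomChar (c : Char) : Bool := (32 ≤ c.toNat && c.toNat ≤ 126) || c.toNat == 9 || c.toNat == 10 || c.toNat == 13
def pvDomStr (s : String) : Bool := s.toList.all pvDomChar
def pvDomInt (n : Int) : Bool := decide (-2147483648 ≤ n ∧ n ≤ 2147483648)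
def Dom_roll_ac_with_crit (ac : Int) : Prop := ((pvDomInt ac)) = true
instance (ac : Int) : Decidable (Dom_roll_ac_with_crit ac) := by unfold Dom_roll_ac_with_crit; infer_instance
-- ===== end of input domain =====

-- B replaces A's fixed 19-iteration loop by a closed-form clamped count (simpler).
-- ===== PORT A =====
def roll_ac_with_crit (ac : Int) : Int :=
  (PySem.List.pyRange 2 21 1).foldl
    (fun damage roll =>
      if roll = 20 then damage + 28
      else if ac ≤ roll ∧ roll ≠ 20 then damage + 14
      else damage) 0

-- ===== PORT B =====
def roll_ac_with_crit_alt (ac : Int) : Int :=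
  28 + 14 * (if 20 - ac < 0 then 0 else if 20 - ac > 18 then 18 else 20 - ac)

-- ===== PRECONDITION & SPEC =====
def Spec_roll_ac_with_crit (ac : Int) (out : Int) : Prop := out = roll_ac_with_crit_alt ac
instance (ac : Int) (out : Int) : Decidable (Spec_roll_ac_with_crit ac out) := by unfold Spec_roll_ac_with_crit; infer_instance

-- ===== CLAIM (what is proved, stated in full; the proofs are below) =====
def Claim_equal_roll_ac_with_crit : Prop := ∀ (ac : Int), Dom_roll_ac_with_crit ac → Spec_roll_ac_with_crit ac (roll_ac_with_crit ac)

-- ===== LEMMAS AND PROOFS =====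

-- ===== VERDICT (by name: the statement is the Claim_ definition above) =====
theorem roll_ac_with_crit_spec : Claim_equal_roll_ac_with_crit := by
  intro ac hdom
  unfold Spec_roll_ac_with_crit
  by_cases h1 : ac ≤ 2
  · have hA : roll_ac_with_crit ac = roll_ac_with_crit 2 := by
      unfold roll_ac_with_crit
      apply List.foldl_ext
      intro b a ha
      have hb := PySem.List.mem_pyRange_one.mp ha
      split_ifs <;> omega
    rw [hA]
    rw [show roll_ac_with_crit 2 = 280 from by decide]
    unfold roll_ac_with_crit_alt
    split_ifs <;> omega
  · by_cases h2 : 20 ≤ ac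
    · have hA : roll_ac_with_crit ac = roll_ac_with_crit 20 := by
        unfold roll_ac_with_crit
        apply List.foldl_ext
        intro b a ha
        have hb := PySem.List.mem_pyRange_one.mp ha
        split_ifs <;> omega
      rw [hA]
      rw [show roll_ac_with_crit 20 = 28 from by decide]
      unfold roll_ac_with_crit_alt
      split_ifs <;> omega
    · have hlo : 3 ≤ ac := by omega
      have hhi : ac ≤ 19 := by omega
      interval_cases ac <;> decide
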